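-- pv_equiv track=rewrite | github.com/mickael-royer/archi-agentic-toolset | src/archi_c4_score/hugo_export.py | calculate_health_status
-- ===== SOURCE A (Python) =====
-- from typing import Any
--
-- def calculate_health_status(
--
--     trends: list[dict[str, Any]],
-- ) -> str:
--     """Calculate overall health status from trends."""
--     if not trends:
--         return "STABLE"
--
--     increasing = sum(1 for t in trends if t.get("direction") == "INCREASING")
--     decreasing = sum(1 for t in trends if t.get("direction") == "DECREASING")
--
--     if decreasing > increasing:
--         return "DECLINING"
--     elif increasing > decreasing:
--         return "IMPROVING"
--     return "STABLE"
-- ===== SOURCE B (Python) =====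
-- from typing import Any
--
-- def calculate_health_status(
--     trends: list[dict[str, Any]],
-- ) -> str:
--     """Calculate overall health status from trends."""
--     balance = 0
--     for t in trends:
--         d = t.get("direction")
--         if d == "INCREASING":
--             balance += 1
--         elif d == "DECREASING":
--             balance -= 1
--     if balance > 0:
--         return "IMPROVING"
--     if balance < 0:
--         return "DECLINING"
--     return "STABLE"
-- ===== Notes on version B (the rewrite author's own statement) =====
-- stated objective: simpler
-- what changed: Replaces the empty-list guard and two separate generator-expression counting passes with one loop maintaining a single net balance, whose sign decides the status.
import Mathlib
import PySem

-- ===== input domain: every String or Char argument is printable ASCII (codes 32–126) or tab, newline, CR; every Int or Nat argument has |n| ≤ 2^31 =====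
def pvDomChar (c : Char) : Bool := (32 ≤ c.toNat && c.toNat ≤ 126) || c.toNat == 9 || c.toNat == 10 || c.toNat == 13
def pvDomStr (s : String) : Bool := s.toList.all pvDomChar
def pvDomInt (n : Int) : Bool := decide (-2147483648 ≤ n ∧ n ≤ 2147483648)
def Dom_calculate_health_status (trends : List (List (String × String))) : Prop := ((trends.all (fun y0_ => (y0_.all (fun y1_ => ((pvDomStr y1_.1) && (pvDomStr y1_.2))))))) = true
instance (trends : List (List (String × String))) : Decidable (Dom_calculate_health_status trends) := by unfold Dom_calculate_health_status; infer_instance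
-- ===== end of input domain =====

-- B replaces the empty guard and two counting passes with one signed-balance pass (objective: simpler).
-- ===== PORT A =====
def calculate_health_status (trends : List (List (String × String))) : String :=
  if trends = [] then "STABLE"
  else
    let increasing : Int := trends.foldl (fun acc t =>
      acc + (if (PySem.Dict.mk t).get? "direction" = some "INCREASING" then 1 else 0)) 0
    let decreasing : Int := trends.foldl (fun acc t =>
      acc + (if (PySem.Dict.mk t).get? "direction" = some "DECREASING" then 1 else 0)) 0
    if decreasing > increasing then "DECLINING"
    else if increasing > decreasing then "IMPROVING"
    else "STABLE"

-- ===== PORT B =====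
def calculate_health_status_alt (trends : List (List (String × String))) : String :=
  let balance : Int := trends.foldl (fun b t =>
    match (PySem.Dict.mk t).get? "direction" with
    | some "INCREASING" => b + 1
    | some "DECREASING" => b - 1
    | _ => b) 0
  if balance > 0 then "IMPROVING"
  else if balance < 0 then "DECLINING"
  else "STABLE"

-- ===== PRECONDITION & SPEC =====
def Spec_calculate_health_status (trends : List (List (String × String))) (out : String) : Prop := out = calculate_health_status_alt trends
instance (trends : List (List (String × String))) (out : String) : Decidable (Spec_calculate_health_status trends out) := by unfold Spec_calculate_health_status; infer_instance

-- ===== CLAIM (what is proved, stated in full; the proofs are below) =====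
def Claim_equal_calculate_health_status : Prop := ∀ (trends : List (List (String × String))), Dom_calculate_health_status trends → Spec_calculate_health_status trends (calculate_health_status trends)

-- ===== LEMMAS AND PROOFS =====

def pvStep (b : Int) (t : List (String × String)) : Int :=
  match (PySem.Dict.mk t).get? "direction" with
  | some "INCREASING" => b + 1
  | some "DECREASING" => b - 1
  | _ => b

def pvInc (t : List (String × String)) : Int :=
  if (PySem.Dict.mk t).get? "direction" = some "INCREASING" then 1 else 0

def pvDec (t : List (String × String)) : Int :=
  if (PySem.Dict.mk t).get? "direction" = some "DECREASING" then 1 else 0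

theorem pvStep_eq (b : Int) (t : List (String × String)) :
    pvStep b t = b + pvInc t - pvDec t := by
  unfold pvStep pvInc pvDec
  rcases hg : (PySem.Dict.mk t).get? "direction" with _ | v
  · simp
  · by_cases hi : v = "INCREASING"
    · subst hi; simp
    · by_cases hd : v = "DECREASING"
      · subst hd; simp
      · have : (match some v with
          | some "INCREASING" => b + 1
          | some "DECREASING" => b - 1
          | _ => b) = b := by
          split <;> simp_all
        rw [this]; simp [hi, hd]

theorem pvFold_shift (f : List (String × String) → Int) :
    ∀ (l : List (List (String × String))) (a : Int),
    l.foldl (fun acc t => acc + f t) a = a + l.foldl (fun acc t => acc + f t) 0 := by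
  intro l
  induction l with
  | nil => intro a; simp
  | cons t rest ih =>
    intro a
    simp only [List.foldl]
    rw [ih (a + f t), ih (0 + f t)]
    ring

theorem pvBalance_eq :
    ∀ (l : List (List (String × String))) (b : Int),
    l.foldl pvStep b
      = b + l.foldl (fun acc t => acc + pvInc t) 0 - l.foldl (fun acc t => acc + pvDec t) 0 := by
  intro l
  induction l with
  | nil => intro b; simp
  | cons t rest ih =>
    intro b
    simp only [List.foldl]
    rw [ih (pvStep b t), pvStep_eq,
        pvFold_shift pvInc rest (0 + pvInc t), pvFold_shift pvDec rest (0 + pvDec t)]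
    ring

-- ===== VERDICT (by name: the statement is the Claim_ definition above) =====
theorem calculate_health_status_spec : Claim_equal_calculate_health_status := by
  intro trends _
  unfold Spec_calculate_health_status calculate_health_status calculate_health_status_alt
  rw [show (fun (b : Int) (t : List (String × String)) =>
      match (PySem.Dict.mk t).get? "direction" with
      | some "INCREASING" => b + 1
      | some "DECREASING" => b - 1
      | _ => b) = pvStep from rfl,
    show (fun (acc : Int) (t : List (String × String)) =>
      acc + if (PySem.Dict.mk t).get? "direction" = some "INCREASING" then 1 else 0)
      = (fun acc t => acc + pvInc t) from rfl,
    show (fun (acc : Int) (t : List (String × String)) =>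
      acc + if (PySem.Dict.mk t).get? "direction" = some "DECREASING" then 1 else 0)
      = (fun acc t => acc + pvDec t) from rfl]
  have hb := pvBalance_eq trends 0
  rcases trends with _ | ⟨t, rest⟩
  · simp
  · simp only [reduceCtorEq, if_false]
    rw [hb]
    split_ifs <;> first | rfl | (exfalso; omega)
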